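-- pv_equiv track=rewrite | github.com/Kaushikpatnaik/Calendly_LLM | experiments.py | format_model_chain_output
-- ===== SOURCE A (Python) =====
-- from collections import defaultdict
--
-- def format_model_chain_output(input_dict):
--     #Code vs Text: code-cushman-001 vs text-curie-001
--     #RLHF vs SFT: text-davinci-002 vs text-davinci-003
--     #Size of model: text-davinci-002 vs text-curie-001
--     #Flan vs RLHF: flan-t5-xl vs text-davinci-003
--     text_vs_code_comparison = defaultdict(dict)
--     rlhf_vs_sft_comparison = defaultdict(dict)
--     model_size_comparison = defaultdict(dict)
--     flan_vs_rlhf_comparison = defaultdict(dict)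
--
--     # LangChain really messes up the outputs
--     for k, v in input_dict.items():
--         model_name = k
--         parsed_output, input_prompt, model_params = v
--
--         if model_name == "code-cushman-001":
--             text_vs_code_comparison[input_prompt][model_name] = parsed_output
--         if model_name == "text-curie-001":
--             text_vs_code_comparison[input_prompt][model_name] = parsed_output
--             model_size_comparison[input_prompt][model_name] = parsed_output
--         if model_name == "text-davinci-002":
--             rlhf_vs_sft_comparison[input_prompt][model_name] = parsed_output
--             model_size_comparison[input_prompt][model_name] = parsed_output
--         if model_name == "text-davinci-003":
--             rlhf_vs_sft_comparison[input_prompt][model_name] = parsed_output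
--         if model_name == "flan-t5-xl":
--             flan_vs_rlhf_comparison[input_prompt][model_name] = parsed_output
--
--     return text_vs_code_comparison, rlhf_vs_sft_comparison, model_size_comparison, flan_vs_rlhf_comparison
-- ===== SOURCE B (Python) =====
-- from collections import defaultdict
--
-- def format_model_chain_output(input_dict):
--     # Four independent staged passes: each bucket is built on its own from the
--     # entries belonging to its model set; a bucket's content depends only on
--     # that subsequence, so this matches the single-pass original exactly.
--     def bucket(models):
--         d = defaultdict(dict)
--         for model_name, (parsed_output, input_prompt, _model_params) in input_dict.items():
--             if model_name in models:
--                 d[input_prompt][model_name] = parsed_output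
--         return d
--     return (bucket(("code-cushman-001", "text-curie-001")),
--             bucket(("text-davinci-002", "text-davinci-003")),
--             bucket(("text-curie-001", "text-davinci-002")),
--             bucket(("flan-t5-xl",)))
-- ===== Notes on version B (the rewrite author's own statement) =====
-- stated objective: alternative
-- what changed: Instead of one pass threading four dicts through a chain of five if-branches, B builds each comparison bucket in its own independent pass with a shared helper that filters the input for that bucket's model set; same O(n) cost (four passes).
import Mathlib
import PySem

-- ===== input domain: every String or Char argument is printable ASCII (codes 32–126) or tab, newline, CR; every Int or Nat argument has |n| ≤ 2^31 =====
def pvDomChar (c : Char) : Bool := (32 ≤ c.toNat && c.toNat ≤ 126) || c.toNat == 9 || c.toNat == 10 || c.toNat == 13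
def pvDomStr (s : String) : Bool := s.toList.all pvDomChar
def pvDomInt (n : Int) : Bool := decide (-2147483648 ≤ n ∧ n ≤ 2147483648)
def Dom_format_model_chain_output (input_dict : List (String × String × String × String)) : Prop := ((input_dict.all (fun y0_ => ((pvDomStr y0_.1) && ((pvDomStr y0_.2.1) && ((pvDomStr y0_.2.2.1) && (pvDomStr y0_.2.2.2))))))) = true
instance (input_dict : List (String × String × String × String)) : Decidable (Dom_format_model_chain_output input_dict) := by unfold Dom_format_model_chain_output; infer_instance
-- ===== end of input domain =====

-- B builds each comparison bucket in its own independent filtered pass (a shared helper per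
-- model set) instead of A's single pass threading four dicts through five if-branches.

-- outer defaultdict(dict) of inner dicts
abbrev pvDD := PySem.Dict String (PySem.Dict String String)

-- d[prompt][model] = parsed  on a defaultdict(dict)
def pvSetDD (d : pvDD) (prompt model parsed : String) : pvDD :=
  d.modify prompt PySem.Dict.empty (fun inner => inner.insert model parsed)

def pvDump (d : pvDD) : List (String × List (String × String)) :=
  d.items.map (fun p => (p.1, p.2.items))

-- ===== PORT A =====
-- loop body of A: five independent if-branches in source order
def pvStepA (st : pvDD × pvDD × pvDD × pvDD) (e : String × String × String × String) :
    pvDD × pvDD × pvDD × pvDD :=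
  let (t, r, m, f) := st
  let model_name := e.1
  let (parsed_output, input_prompt, _model_params) := e.2
  let t := if model_name == "code-cushman-001" then pvSetDD t input_prompt model_name parsed_output else t
  let (t, m) := if model_name == "text-curie-001" then
      (pvSetDD t input_prompt model_name parsed_output, pvSetDD m input_prompt model_name parsed_output)
    else (t, m)
  let (r, m) := if model_name == "text-davinci-002" then
      (pvSetDD r input_prompt model_name parsed_output, pvSetDD m input_prompt model_name parsed_output)
    else (r, m)
  let r := if model_name == "text-davinci-003" then pvSetDD r input_prompt model_name parsed_output else r
  let f := if model_name == "flan-t5-xl" then pvSetDD f input_prompt model_name parsed_output else f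
  (t, r, m, f)

def format_model_chain_output (input_dict : List (String × String × String × String)) : (List (String × List (String × String))) × (List (String × List (String × String))) × (List (String × List (String × String))) × (List (String × List (String × String))) :=
  let (t, r, m, f) := input_dict.foldl pvStepA
    (PySem.Dict.empty, PySem.Dict.empty, PySem.Dict.empty, PySem.Dict.empty)
  (pvDump t, pvDump r, pvDump m, pvDump f)

-- ===== PORT B =====
-- the body of B's helper `bucket`: keep the entries whose model is in `models`
def pvBucketStep (models : List String) (d : pvDD) (e : String × String × String × String) : pvDD :=
  if models.contains e.1 then pvSetDD d e.2.2.1 e.1 e.2.1 else d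

def pvBucket (input_dict : List (String × String × String × String)) (models : List String) : pvDD :=
  input_dict.foldl (pvBucketStep models) PySem.Dict.empty

def format_model_chain_output_alt (input_dict : List (String × String × String × String)) : (List (String × List (String × String))) × (List (String × List (String × String))) × (List (String × List (String × String))) × (List (String × List (String × String))) :=
  (pvDump (pvBucket input_dict ["code-cushman-001", "text-curie-001"]),
   pvDump (pvBucket input_dict ["text-davinci-002", "text-davinci-003"]),
   pvDump (pvBucket input_dict ["text-curie-001", "text-davinci-002"]),
   pvDump (pvBucket input_dict ["flan-t5-xl"]))

-- ===== PRECONDITION & SPEC =====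
def Spec_format_model_chain_output (input_dict : List (String × String × String × String)) (out : (List (String × List (String × String))) × (List (String × List (String × String))) × (List (String × List (String × String))) × (List (String × List (String × String)))) : Prop := out = format_model_chain_output_alt input_dict
instance (input_dict : List (String × String × String × String)) (out : (List (String × List (String × String))) × (List (String × List (String × String))) × (List (String × List (String × String))) × (List (String × List (String × String)))) : Decidable (Spec_format_model_chain_output input_dict out) := by
  unfold Spec_format_model_chain_output
  have d1 : DecidableEq (List (String × List (String × String))) := by infer_instance
  exact @instDecidableEqProd _ _ d1 (@instDecidableEqProd _ _ d1 (@instDecidableEqProd _ _ d1 d1)) out _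

-- ===== CLAIM =====
def Claim_equal_format_model_chain_output : Prop := ∀ (input_dict : List (String × String × String × String)), Dom_format_model_chain_output input_dict → Spec_format_model_chain_output input_dict (format_model_chain_output input_dict)

-- ===== LEMMAS AND PROOFS =====
-- one step of A's fold is the componentwise step of B's four bucket passes
theorem pvStepA_components (t r m f : pvDD) (e : String × String × String × String) :
    pvStepA (t, r, m, f) e =
      (pvBucketStep ["code-cushman-001", "text-curie-001"] t e,
       pvBucketStep ["text-davinci-002", "text-davinci-003"] r e,
       pvBucketStep ["text-curie-001", "text-davinci-002"] m e,
       pvBucketStep ["flan-t5-xl"] f e) := by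
  obtain ⟨k, parsed, prompt, params⟩ := e
  by_cases h1 : k = "code-cushman-001"
  · subst h1; rfl
  by_cases h2 : k = "text-curie-001"
  · subst h2; rfl
  by_cases h3 : k = "text-davinci-002"
  · subst h3; rfl
  by_cases h4 : k = "text-davinci-003"
  · subst h4; rfl
  by_cases h5 : k = "flan-t5-xl"
  · subst h5; rfl
  simp [pvStepA, pvBucketStep, h1, h2, h3, h4, h5]

-- A's single fold over a 4-tuple state equals the four independent bucket folds
theorem pvFold_split (l : List (String × String × String × String)) (t r m f : pvDD) :
    l.foldl pvStepA (t, r, m, f) =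
      (l.foldl (pvBucketStep ["code-cushman-001", "text-curie-001"]) t,
       l.foldl (pvBucketStep ["text-davinci-002", "text-davinci-003"]) r,
       l.foldl (pvBucketStep ["text-curie-001", "text-davinci-002"]) m,
       l.foldl (pvBucketStep ["flan-t5-xl"]) f) := by
  induction l generalizing t r m f with
  | nil => rfl
  | cons e l ih =>
      simp only [List.foldl_cons, pvStepA_components]
      exact ih _ _ _ _

-- ===== VERDICT =====
theorem format_model_chain_output_spec : Claim_equal_format_model_chain_output := by
  intro input_dict _
  unfold Spec_format_model_chain_output format_model_chain_output format_model_chain_output_alt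
  rw [pvFold_split]
  rfl
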